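-- pv_equiv track=rewrite | github.com/kunal5042/AlgoExpert | 03 AlgoExpert Hard/34 Underscorify Substring.py | get_indices_of_target
-- ===== SOURCE A (Python) =====
-- def get_indices_of_target(string, target):
--     indices = list()
--     for idx in range(len(string)):
--         if string[idx] == target[0]:
--             jdx = idx + 1
--             matched = True
--             for tidx in range(1, len(target)):
--                 if jdx >= len(string) or string[jdx] != target[tidx]:
--                     matched = False
--                     break
--                 jdx += 1
--             if matched is True:
--                 indices.append(idx)
--     return merge_overlapping(indices, target)
--
-- def merge_overlapping(indices, target):
--     merged = list()
--     idx = 0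
--     while idx < len(indices):
--         if idx + 1 >= len(indices):
--             merged.append((indices[idx], indices[idx]+len(target)-1))
--             break
--
--         if indices[idx+1] - indices[idx] <= len(target):
--             start = indices[idx]
--             while idx < len(indices)-1 and (indices[idx+1] - indices[idx] <= len(target)):
--                 end = indices[idx+1]
--                 idx += 1
--             merged.append((start, end+len(target)-1))
--             idx += 1
--             continue
--
--         else:
--             merged.append((indices[idx], indices[idx]+len(target)-1))
--             idx += 1
--     return merged
-- ===== SOURCE B (Python) =====
-- def get_indices_of_target(string, target):
--     m = len(target)
--     merged = []
--     for i in range(len(string) - m + 1):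
--         if string.startswith(target, i):
--             if merged and i <= merged[-1][1] + 1:
--                 merged[-1] = (merged[-1][0], i + m - 1)
--             else:
--                 merged.append((i, i + m - 1))
--     return merged
-- ===== Notes on version B (the rewrite author's own statement) =====
-- stated objective: faster
-- what changed: B replaces A's two-phase design (collect every match index with a hand-rolled per-character inner loop, then merge with an index-walking while/while loop) by a single pass that tests str.startswith(target, i) at each position and extends or opens the last interval in place.
-- outside the precondition, e.g. on get_indices_of_target('', ''): A returns [], B returns [(0, -1)]
import Mathlib
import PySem

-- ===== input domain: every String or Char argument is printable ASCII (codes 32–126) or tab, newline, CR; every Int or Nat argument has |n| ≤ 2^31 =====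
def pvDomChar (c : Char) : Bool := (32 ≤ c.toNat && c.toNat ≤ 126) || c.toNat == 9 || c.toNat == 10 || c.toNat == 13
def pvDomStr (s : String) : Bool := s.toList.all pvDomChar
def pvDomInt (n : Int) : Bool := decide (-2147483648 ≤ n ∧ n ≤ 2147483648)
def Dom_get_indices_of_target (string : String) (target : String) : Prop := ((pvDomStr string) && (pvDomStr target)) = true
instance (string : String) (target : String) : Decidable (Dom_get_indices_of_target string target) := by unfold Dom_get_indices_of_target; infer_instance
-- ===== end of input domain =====

-- B replaces A's collect-then-merge (hand-rolled char-by-char search + index-walking merge) by a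
-- single pass that tests `startswith` at each position and extends/opens the last interval in place.

-- ===== PORT A =====

-- inner `for tidx in range(1, len(target))` loop of A: returns the final value of `matched`
def aMatch (cs ts : List Char) (jdx : Int) (tidx : Nat) : Bool :=
  if tidx < ts.length then
    if (cs.length : Int) ≤ jdx ∨ PySem.List.pyGetD cs jdx ' ' ≠ PySem.List.pyGetD ts (tidx : Int) ' ' then
      false                                   -- matched = False; break
    else
      aMatch cs ts (jdx + 1) (tidx + 1)       -- jdx += 1, next tidx
  else true
termination_by ts.length - tidx

-- inner `while idx < len(indices)-1 and indices[idx+1]-indices[idx] <= len(target)` of merge_overlapping: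
-- e is the running `end`; returns (end, remaining indices after the chain)
def chaseA (m : Int) (e : Int) : List Int → Int × List Int
  | [] => (e, [])
  | j :: rest => if j - e ≤ m then chaseA m j rest else (e, j :: rest)

theorem chaseA_length_le (m e : Int) (l : List Int) : (chaseA m e l).2.length ≤ l.length := by
  induction l generalizing e with
  | nil => simp [chaseA]
  | cons j rest ih =>
    simp only [chaseA]
    split
    · exact le_trans (ih j) (Nat.le_succ _)
    · simp

-- outer `while idx < len(indices)` of merge_overlapping, as structural recursion on the suffix at idx
def mergeA (m : Int) : List Int → List (List Int)
  | [] => []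
  | [i] => [[i, i + m - 1]]                                   -- idx+1 >= len(indices): append, break
  | i :: j :: rest =>
    if j - i ≤ m then
      [i, (chaseA m j rest).1 + m - 1] :: mergeA m (chaseA m j rest).2   -- merged chain, idx += 1, continue
    else
      [i, i + m - 1] :: mergeA m (j :: rest)                  -- lone occurrence, idx += 1
termination_by l => l.length
decreasing_by
  · have := chaseA_length_le m j rest; simp; omega
  · simp

def get_indices_of_target (string : String) (target : String) : List (List Int) :=
  mergeA (target.toList.length : Int)
    ((PySem.List.pyRange 0 (string.toList.length : Int) 1).foldl
      (fun ind idx =>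
        if PySem.List.pyGetD string.toList idx ' ' = PySem.List.pyGetD target.toList 0 ' ' then
          (if aMatch string.toList target.toList (idx + 1) 1 then ind ++ [idx] else ind)
        else ind) [])

-- ===== PORT B =====

-- loop body of B: `string.startswith(target, i)` (exact for 0 ≤ i, the values range yields),
-- then extend the last interval or open a new one; the list is kept last-interval-first
def bStep (cs ts : List Char) (acc : List (Int × Int)) (i : Int) : List (Int × Int) :=
  if PySem.Chars.startswith (cs.drop i.toNat) ts then
    match acc with
    | (s, e) :: rest =>
        if i ≤ e + 1 then (s, i + (ts.length : Int) - 1) :: rest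
        else (i, i + (ts.length : Int) - 1) :: (s, e) :: rest
    | [] => [(i, i + (ts.length : Int) - 1)]
  else acc

def get_indices_of_target_alt (string : String) (target : String) : List (List Int) :=
  (((PySem.List.pyRange 0 ((string.toList.length : Int) - (target.toList.length : Int) + 1) 1).foldl
      (bStep string.toList target.toList) []).reverse).map (fun p => [p.1, p.2])

-- ===== PRECONDITION & SPEC =====
-- Pre_ excludes an empty target: A evaluates target[0] and raises IndexError whenever string is
-- nonempty, and on the remaining ("","") corner both answers are defensible for an unspecified
-- zero-width match (A returns [], B returns the zero-width interval [[0,-1]]).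
def Pre_get_indices_of_target (string : String) (target : String) : Prop := target ≠ ""
instance (string : String) (target : String) : Decidable (Pre_get_indices_of_target string target) := by
  unfold Pre_get_indices_of_target; infer_instance

def pvWitness_get_indices_of_target : String × String := ("aabaa", "aa")

def Spec_get_indices_of_target (string : String) (target : String) (out : List (List Int)) : Prop := out = get_indices_of_target_alt string target
instance (string : String) (target : String) (out : List (List Int)) : Decidable (Spec_get_indices_of_target string target out) := by unfold Spec_get_indices_of_target; infer_instance

-- ===== CLAIM (what is proved, stated in full; the proofs are below) =====
def Claim_equal_get_indices_of_target : Prop := ∀ (string : String) (target : String), Dom_get_indices_of_target string target → Pre_get_indices_of_target string target → Spec_get_indices_of_target string target (get_indices_of_target string target)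

-- ===== LEMMAS AND PROOFS =====

-- the B-side step once a match at i is known (bStep with its guard discharged)
def mStep (m : Int) (acc : List (Int × Int)) (i : Int) : List (Int × Int) :=
  match acc with
  | (s, e) :: rest =>
      if i ≤ e + 1 then (s, i + m - 1) :: rest
      else (i, i + m - 1) :: (s, e) :: rest
  | [] => [(i, i + m - 1)]

def outMap (acc : List (Int × Int)) : List (List Int) := acc.reverse.map (fun p => [p.1, p.2])

theorem bStep_eq (cs ts : List Char) (acc : List (Int × Int)) (i : Int) :
    bStep cs ts acc i =
      if PySem.Chars.startswith (cs.drop i.toNat) ts then mStep (ts.length : Int) acc i else acc := by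
  cases acc with
  | nil => rfl
  | cons h t => cases h; rfl

theorem startswith_decide (s p : List Char) : PySem.Chars.startswith s p = decide (p <+: s) := by
  have h := PySem.Chars.startswith_iff s p
  cases hb : PySem.Chars.startswith s p
  · rw [hb] at h; simp only [Bool.false_eq_true, false_iff] at h; simp [h]
  · rw [hb] at h; simp only [true_iff] at h; simp [h]

theorem foldl_guarded (q : Int → Bool) (g : List (Int × Int) → Int → List (Int × Int)) :
    ∀ (l : List Int) (acc : List (Int × Int)),
      l.foldl (fun a i => if q i then g a i else a) acc = (l.filter q).foldl g acc := by
  intro l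
  induction l with
  | nil => intro acc; rfl
  | cons x xs ih => intro acc; by_cases h : q x <;> simp [h, ih]

theorem mergeA_cons (m j : Int) (tl : List Int) :
    mergeA m (j :: tl) = [j, (chaseA m j tl).1 + m - 1] :: mergeA m (chaseA m j tl).2 := by
  cases tl with
  | nil => simp [mergeA, chaseA]
  | cons k tl' =>
    by_cases h : k - j ≤ m
    · simp only [mergeA, chaseA, if_pos h]
    · simp only [mergeA, chaseA, if_neg h]

theorem foldl_mStep (m : Int) (occs : List Int) :
    ∀ (p s : Int) (rest : List (Int × Int)),
      outMap (occs.foldl (mStep m) ((s, p + m - 1) :: rest)) =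
        outMap rest ++ [s, (chaseA m p occs).1 + m - 1] :: mergeA m (chaseA m p occs).2 := by
  induction occs with
  | nil => intro p s rest; simp [chaseA, mergeA, outMap]
  | cons j tl ih =>
    intro p s rest
    rw [List.foldl_cons]
    by_cases h : j - p ≤ m
    · have hstep : mStep m ((s, p + m - 1) :: rest) j = (s, j + m - 1) :: rest := by
        simp [mStep]; omega
      rw [hstep, ih j s rest]
      simp only [chaseA, if_pos h]
    · have hstep : mStep m ((s, p + m - 1) :: rest) j
          = (j, j + m - 1) :: (s, p + m - 1) :: rest := by
        simp [mStep]; omega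
      rw [hstep, ih j j ((s, p + m - 1) :: rest)]
      simp only [chaseA, if_neg h]
      rw [mergeA_cons]
      simp [outMap]

theorem foldl_mStep_nil (m : Int) (occs : List Int) :
    outMap (occs.foldl (mStep m) []) = mergeA m occs := by
  cases occs with
  | nil => simp [outMap, mergeA]
  | cons i tl =>
    rw [List.foldl_cons]
    have h0 : mStep m [] i = [(i, i + m - 1)] := rfl
    rw [h0, foldl_mStep m tl i i [], mergeA_cons]
    simp [outMap]

theorem aMatch_eq (cs ts : List Char) :
    ∀ (k t i : Nat), k = ts.length - t →
      aMatch cs ts (i : Int) t = decide (ts.drop t <+: cs.drop i) := by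
  intro k
  induction k with
  | zero =>
    intro t i hk
    have ht : ts.length ≤ t := by omega
    rw [aMatch, if_neg (by omega)]
    simp [List.drop_eq_nil_of_le ht]
  | succ k ih =>
    intro t i hk
    have ht : t < ts.length := by omega
    rw [aMatch, if_pos ht]
    by_cases hlen : cs.length ≤ i
    · rw [if_pos (Or.inl (by exact_mod_cast hlen))]
      have hno : ¬ (ts.drop t <+: cs.drop i) := by
        simp only [List.drop_eq_nil_of_le hlen, List.prefix_nil, List.drop_eq_nil_iff]
        omega
      simp [hno]
    · have hi : i < cs.length := by omega
      by_cases hch : PySem.List.pyGetD cs (i : Int) ' ' = PySem.List.pyGetD ts (t : Int) ' '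
      · rw [if_neg (by push Not; exact ⟨by exact_mod_cast hi, hch⟩)]
        have hcast : ((i : Int) + 1) = ((i + 1 : Nat) : Int) := by push_cast; ring
        rw [hcast, ih (t + 1) (i + 1) (by omega)]
        have heq : cs[i] = ts[t] := by
          simpa [PySem.List.pyGetD_natCast, List.getD_eq_getElem?_getD,
            List.getElem?_eq_getElem, hi, ht] using hch
        rw [decide_eq_decide, List.drop_eq_getElem_cons ht, List.drop_eq_getElem_cons hi,
          List.cons_prefix_cons]
        simp [heq]
      · rw [if_pos (Or.inr hch)]
        have hne : ts[t] ≠ cs[i] := by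
          simp only [PySem.List.pyGetD_natCast, List.getD_eq_getElem?_getD,
            List.getElem?_eq_getElem, hi, ht] at hch
          exact fun h => hch h.symm
        have hno : ¬ (ts.drop t <+: cs.drop i) := by
          rw [List.drop_eq_getElem_cons ht, List.drop_eq_getElem_cons hi,
            List.cons_prefix_cons]
          exact fun h => hne h.1
        simp [hno]

theorem pA_eq (cs ts : List Char) (i : Nat) (hi : i < cs.length) (hts : ts ≠ []) :
    ((decide (PySem.List.pyGetD cs (i : Int) ' ' = PySem.List.pyGetD ts 0 ' ')) &&
      aMatch cs ts ((i : Int) + 1) 1) = decide (ts <+: cs.drop i) := by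
  have h0 : 0 < ts.length := List.length_pos_of_ne_nil hts
  have hcast : ((i : Int) + 1) = ((i + 1 : Nat) : Int) := by push_cast; ring
  rw [hcast, aMatch_eq cs ts (ts.length - 1) 1 (i + 1) rfl]
  have hts' : ts = ts[0] :: ts.drop 1 := by
    simpa using List.drop_eq_getElem_cons h0
  rw [show (0 : Int) = ((0 : Nat) : Int) from rfl]
  simp only [PySem.List.pyGetD_natCast, List.getD_eq_getElem _ _ hi,
    List.getD_eq_getElem _ _ h0]
  rw [← Bool.decide_and, decide_eq_decide, List.drop_eq_getElem_cons hi]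
  constructor
  · rintro ⟨h1, h2⟩
    rw [hts']
    exact List.cons_prefix_cons.mpr ⟨h1.symm, h2⟩
  · intro h
    rw [hts'] at h
    obtain ⟨he, hp⟩ := List.cons_prefix_cons.mp h
    exact ⟨he.symm, hp⟩

theorem filter_range_reduce (p : Nat → Bool) (n k : Nat) (hk : k ≤ n)
    (hp : ∀ i, p i = true → i < k) :
    (List.range n).filter p = (List.range k).filter p := by
  conv_lhs => rw [show n = k + (n - k) from by omega, List.range_add]
  rw [List.filter_append]
  have h2 : ((List.range (n - k)).map (k + ·)).filter p = [] := by
    apply List.filter_eq_nil_iff.mpr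
    intro a ha
    simp only [List.mem_map, List.mem_range] at ha
    obtain ⟨j, _, rfl⟩ := ha
    intro hpa
    have := hp _ hpa
    omega
  rw [h2, List.append_nil]

-- occurrence lists of A and B coincide
theorem occs_eq (cs ts : List Char) (hts : ts ≠ []) :
    ((PySem.List.pyRange 0 (cs.length : Int) 1).foldl
      (fun ind idx =>
        if PySem.List.pyGetD cs idx ' ' = PySem.List.pyGetD ts 0 ' ' then
          (if aMatch cs ts (idx + 1) 1 then ind ++ [idx] else ind)
        else ind) []) =
    ((PySem.List.pyRange 0 ((cs.length : Int) - (ts.length : Int) + 1) 1).filter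
      (fun i => PySem.Chars.startswith (cs.drop i.toNat) ts)) := by
  have hm : 0 < ts.length := List.length_pos_of_ne_nil hts
  have hfun : (fun (ind : List Int) idx =>
      if PySem.List.pyGetD cs idx ' ' = PySem.List.pyGetD ts 0 ' ' then
        (if aMatch cs ts (idx + 1) 1 then ind ++ [idx] else ind)
      else ind)
      = fun (ind : List Int) idx =>
        if (decide (PySem.List.pyGetD cs idx ' ' = PySem.List.pyGetD ts 0 ' ')
            && aMatch cs ts (idx + 1) 1) then ind ++ [idx] else ind := by
    funext ind idx
    by_cases h1 : PySem.List.pyGetD cs idx ' ' = PySem.List.pyGetD ts 0 ' '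
      <;> by_cases h2 : aMatch cs ts (idx + 1) 1 = true <;> simp [h1, h2]
  rw [hfun, PySem.List.foldl_append_if_eq_filter, List.nil_append,
    PySem.List.pyRange_one, PySem.List.pyRange_one, List.filter_map, List.filter_map]
  simp only [sub_zero, Int.toNat_natCast, zero_add]
  rw [show ((cs.length : Int) - (ts.length : Int) + 1).toNat
      = cs.length + 1 - ts.length from by omega]
  congr 1
  refine Eq.trans (List.filter_congr (q := fun a => decide (ts <+: cs.drop a)) ?_)
    (Eq.trans (filter_range_reduce (fun a => decide (ts <+: cs.drop a)) cs.length
        (cs.length + 1 - ts.length) (by omega) ?_)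
      (List.filter_congr (q := fun a => decide (ts <+: cs.drop a)) ?_).symm)
  · intro a ha
    have hi : a < cs.length := List.mem_range.mp ha
    simpa using pA_eq cs ts a hi hts
  · intro i hdec
    have hpre : ts <+: cs.drop i := of_decide_eq_true hdec
    have hl := hpre.length_le
    rw [List.length_drop] at hl
    omega
  · intro a _
    simp [startswith_decide]

-- ===== VERDICT (by name: the statement is the Claim_ definition above) =====
theorem get_indices_of_target_spec : Claim_equal_get_indices_of_target := by
  intro s t _ hpre
  unfold Spec_get_indices_of_target get_indices_of_target get_indices_of_target_alt
  have hts : t.toList ≠ [] := fun h => hpre (String.toList_eq_nil_iff.mp h)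
  rw [occs_eq s.toList t.toList hts]
  have hb : bStep s.toList t.toList = fun a i =>
      if PySem.Chars.startswith (s.toList.drop i.toNat) t.toList then
        mStep (t.toList.length : Int) a i
      else a :=
    funext fun a => funext fun i => bStep_eq _ _ a i
  rw [hb, foldl_guarded]
  exact (foldl_mStep_nil _ _).symm
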